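-- pv_equiv track=rewrite | github.com/cleeneuro/whisker_tasks_analysis | python_analysis/calcium_imaging/scatterplot_cs_responses.py | get_animals_by_status
-- ===== SOURCE A (Python) =====
-- def get_animals_by_status(metadata, status_type='learner', status_values=None):
--     """
--     Get lists of animals based on their status.
--
--     Args:
--         metadata (dict): Animal metadata dictionary
--         status_type (str): Type of status to filter by ('learner', 'cheater', 'intrinsic_imaging_result', etc.)
--         status_values (list): List of status values to include (e.g., ['learner', 'non-learner'])
--
--     Returns:
--         dict: Dictionary with status values as keys and lists of animal names as values
--     """
--     if status_values is None:
--         if status_type == 'learner':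
--             status_values = ['learner', 'non-learner']
--         elif status_type == 'cheater':
--             status_values = ['cheater', 'non-cheater']
--         elif status_type == 'intrinsic_imaging_result':
--             status_values = ['c1_c2', 'other']
--         else:
--             # Get all unique values for this status type
--             status_values = list(set(animal_data[status_type] for animal_data in metadata.values()))
--             status_values = [s for s in status_values if s != 'unknown']
--
--     animals_by_status = {status: [] for status in status_values}
--
--     for animal_name, animal_data in metadata.items():
--         animal_status = animal_data.get(status_type, 'unknown')
--
--         # Special handling for intrinsic_imaging_result
--         if status_type == 'intrinsic_imaging_result':
--             if animal_status == 'c1_c2':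
--                 animals_by_status['c1_c2'].append(animal_name)
--             elif animal_status not in ['unknown', 'n/a']:
--                 animals_by_status['other'].append(animal_name)
--         # Special handling for learner (anything other than learner goes to non-learner)
--         elif status_type == 'learner':
--             if animal_status == 'learner':
--                 animals_by_status['learner'].append(animal_name)
--             elif animal_status not in ['unknown']:
--                 animals_by_status['non-learner'].append(animal_name)
--         else:
--             if animal_status in status_values:
--                 animals_by_status[animal_status].append(animal_name)
--
--     return animals_by_status
-- ===== SOURCE B (Python) =====
-- def get_animals_by_status(metadata, status_type='learner', status_values=None):
--     if status_values is None:
--         if status_type == 'learner':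
--             status_values = ['learner', 'non-learner']
--         elif status_type == 'cheater':
--             status_values = ['cheater', 'non-cheater']
--         elif status_type == 'intrinsic_imaging_result':
--             status_values = ['c1_c2', 'other']
--         else:
--             status_values = list(set(animal_data[status_type] for animal_data in metadata.values()))
--             status_values = [s for s in status_values if s != 'unknown']
--
--     def bucket_test(key):
--         if status_type == 'learner':
--             if key == 'learner':
--                 return lambda st: st == 'learner'
--             if key == 'non-learner':
--                 return lambda st: st not in ('unknown', 'learner')
--             return lambda st: False
--         if status_type == 'intrinsic_imaging_result':
--             if key == 'c1_c2':
--                 return lambda st: st == 'c1_c2'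
--             if key == 'other':
--                 return lambda st: st not in ('unknown', 'n/a', 'c1_c2')
--             return lambda st: False
--         return lambda st: st == key
--
--     result = {}
--     for key in status_values:
--         if key in result:
--             continue
--         test = bucket_test(key)
--         result[key] = [name for name, data in metadata.items()
--                        if test(data.get(status_type, 'unknown'))]
--     return result
-- ===== Notes on version B (the rewrite author's own statement) =====
-- stated objective: alternative
-- what changed: Inverts the loop structure: instead of one pass over animals dispatching each through nested status_type/status branches into mutable buckets, B builds each output bucket by a filtered pass over metadata with a per-key membership predicate (empty buckets still appear, keys in status_values first-occurrence order).
import Mathlib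
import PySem

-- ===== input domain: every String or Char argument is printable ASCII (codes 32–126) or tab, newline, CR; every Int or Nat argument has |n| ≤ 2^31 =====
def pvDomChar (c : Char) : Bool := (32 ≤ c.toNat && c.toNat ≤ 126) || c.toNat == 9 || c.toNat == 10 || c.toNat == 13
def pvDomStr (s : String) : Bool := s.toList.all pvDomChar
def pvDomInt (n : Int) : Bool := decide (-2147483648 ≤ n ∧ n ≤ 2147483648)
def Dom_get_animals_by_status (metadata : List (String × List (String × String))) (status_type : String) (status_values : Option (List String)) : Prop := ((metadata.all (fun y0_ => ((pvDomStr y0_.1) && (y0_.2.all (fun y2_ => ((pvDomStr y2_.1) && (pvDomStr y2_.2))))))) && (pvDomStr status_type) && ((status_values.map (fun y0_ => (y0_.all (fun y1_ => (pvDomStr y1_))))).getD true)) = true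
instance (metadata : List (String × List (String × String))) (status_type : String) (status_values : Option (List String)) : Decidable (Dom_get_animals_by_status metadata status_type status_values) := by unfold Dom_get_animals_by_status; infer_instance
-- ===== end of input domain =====

-- B inverts A's loop structure: one filtered pass over metadata per status key instead of one pass
-- over animals dispatching into mutable buckets (objective: alternative, same results).

-- Shared helpers: both Pythons contain the identical status_values-defaulting block and the identical
-- `animal_data.get(status_type, 'unknown')` lookup, so the ports share these two helpers.
-- `animal_data` is a Python dict (assoc list here; lookup = first match).
def pvStatusOf (status_type : String) (animal_data : List (String × String)) : String :=
  (PySem.Dict.mk animal_data).getD status_type "unknown"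

-- The default-else branch reads `animal_data[status_type]` (KeyError when absent — those inputs are
-- outside Pre_, where the key is present this getD is exact); the resulting "unknown" placeholder is
-- filtered away on the next line exactly as in the Python.  The Python comprehension iterates a set:
-- its hash order only affects the KEY order of the returned dict (bucket contents are order-free),
-- and dict outputs are compared ignoring order; the port uses first-occurrence order.
def pvResolveValues (metadata : List (String × List (String × String))) (status_type : String) (status_values : Option (List String)) : List String :=
  match status_values with
  | some vs => vs
  | none =>
    if status_type = "learner" then ["learner", "non-learner"]
    else if status_type = "cheater" then ["cheater", "non-cheater"]
    else if status_type = "intrinsic_imaging_result" then ["c1_c2", "other"]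
    else (PySem.Set.ofList (metadata.map (fun p => pvStatusOf status_type p.2))).filter
           (fun s => decide (s ≠ "unknown"))

-- ===== PORT A =====
-- `animals_by_status[key].append(name)`: raises KeyError when the key is absent (outside Pre_);
-- where the key is present it updates the entry in place.
def pvAppendAt (d : PySem.Dict String (List String)) (k : String) (name : String) :
    PySem.Dict String (List String) :=
  match d.get? k with
  | some v => d.insert k (v ++ [name])
  | none => d

def get_animals_by_status (metadata : List (String × List (String × String))) (status_type : String) (status_values : Option (List String)) : List (String × List String) :=
  let vs := pvResolveValues metadata status_type status_values
  -- animals_by_status = {status: [] for status in status_values}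
  let init : PySem.Dict String (List String) :=
    vs.foldl (fun d s => d.insert s ([] : List String)) PySem.Dict.empty
  -- for animal_name, animal_data in metadata.items(): …
  let final := metadata.foldl (fun d p =>
    let animal_status := pvStatusOf status_type p.2
    if status_type = "intrinsic_imaging_result" then
      if animal_status = "c1_c2" then pvAppendAt d "c1_c2" p.1
      else if ¬ (animal_status = "unknown" ∨ animal_status = "n/a") then pvAppendAt d "other" p.1
      else d
    else if status_type = "learner" then
      if animal_status = "learner" then pvAppendAt d "learner" p.1
      else if ¬ (animal_status = "unknown") then pvAppendAt d "non-learner" p.1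
      else d
    else if animal_status ∈ vs then pvAppendAt d animal_status p.1
    else d) init
  final.items

-- ===== PORT B =====
-- bucket_test(key): the per-key membership predicate of B.
def pvBucketTest (status_type key st : String) : Bool :=
  if status_type = "learner" then
    if key = "learner" then st == "learner"
    else if key = "non-learner" then !(st == "unknown" || st == "learner")
    else false
  else if status_type = "intrinsic_imaging_result" then
    if key = "c1_c2" then st == "c1_c2"
    else if key = "other" then !(st == "unknown" || st == "n/a" || st == "c1_c2")
    else false
  else st == key

def get_animals_by_status_alt (metadata : List (String × List (String × String))) (status_type : String) (status_values : Option (List String)) : List (String × List String) :=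
  let vs := pvResolveValues metadata status_type status_values
  -- for key in status_values: if key in result: continue; result[key] = [name for … if test(…)]
  (vs.foldl (fun d key =>
      if d.contains key then d
      else d.insert key
        ((metadata.filter (fun p => pvBucketTest status_type key (pvStatusOf status_type p.2))).map
          (fun p => p.1)))
    PySem.Dict.empty).items

-- ===== PRECONDITION & SPEC =====
-- Pre_ excludes exactly the inputs on which A raises KeyError: (a) status_values=None with a
-- non-special status_type while some animal lacks the status_type key (animal_data[status_type]);
-- (b) an explicit status_values list that is missing a bucket key ('learner'/'non-learner' or
-- 'c1_c2'/'other') to which some animal's status would be appended (with status_values=None the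
-- defaulted list always contains those keys, so the membership conjuncts hold trivially there).
def Pre_get_animals_by_status (metadata : List (String × List (String × String))) (status_type : String) (status_values : Option (List String)) : Prop :=
  (status_values = none →
    (status_type = "learner" ∨ status_type = "cheater" ∨ status_type = "intrinsic_imaging_result" ∨
      ∀ p ∈ metadata, (PySem.Dict.mk p.2).contains status_type = true)) ∧
  (status_type = "learner" → ∀ p ∈ metadata,
      (pvStatusOf status_type p.2 = "learner" →
        "learner" ∈ pvResolveValues metadata status_type status_values) ∧
      (pvStatusOf status_type p.2 ≠ "learner" → pvStatusOf status_type p.2 ≠ "unknown" →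
        "non-learner" ∈ pvResolveValues metadata status_type status_values)) ∧
  (status_type = "intrinsic_imaging_result" → ∀ p ∈ metadata,
      (pvStatusOf status_type p.2 = "c1_c2" →
        "c1_c2" ∈ pvResolveValues metadata status_type status_values) ∧
      (pvStatusOf status_type p.2 ≠ "c1_c2" → pvStatusOf status_type p.2 ≠ "unknown" →
        pvStatusOf status_type p.2 ≠ "n/a" →
        "other" ∈ pvResolveValues metadata status_type status_values))
instance (metadata : List (String × List (String × String))) (status_type : String) (status_values : Option (List String)) : Decidable (Pre_get_animals_by_status metadata status_type status_values) := by
  unfold Pre_get_animals_by_status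
  refine instDecidableAnd (dp := ?_) (dq := instDecidableAnd (dp := ?_) (dq := ?_)) <;> infer_instance

def pvWitness_get_animals_by_status : (List (String × List (String × String))) × String × Option (List String) :=
  ([("m1", [("learner", "learner")]), ("m2", [("learner", "no")])], "learner", none)

def Spec_get_animals_by_status (metadata : List (String × List (String × String))) (status_type : String) (status_values : Option (List String)) (out : List (String × List String)) : Prop := out = get_animals_by_status_alt metadata status_type status_values
instance (metadata : List (String × List (String × String))) (status_type : String) (status_values : Option (List String)) (out : List (String × List String)) : Decidable (Spec_get_animals_by_status metadata status_type status_values out) := by unfold Spec_get_animals_by_status; infer_instance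

-- ===== CLAIM (what is proved, stated in full; the proofs are below) =====
def Claim_equal_get_animals_by_status : Prop := ∀ (metadata : List (String × List (String × String))) (status_type : String) (status_values : Option (List String)), Dom_get_animals_by_status metadata status_type status_values → Pre_get_animals_by_status metadata status_type status_values → Spec_get_animals_by_status metadata status_type status_values (get_animals_by_status metadata status_type status_values)

-- ===== LEMMAS AND PROOFS =====

-- The bucket A's dispatch appends an animal with status `st` to (none = no bucket).
def pvBucket (status_type : String) (vs : List String) (st : String) : Option String :=
  if status_type = "intrinsic_imaging_result" then
    if st = "c1_c2" then some "c1_c2"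
    else if ¬ (st = "unknown" ∨ st = "n/a") then some "other"
    else none
  else if status_type = "learner" then
    if st = "learner" then some "learner"
    else if ¬ (st = "unknown") then some "non-learner"
    else none
  else if st ∈ vs then some st
  else none

theorem pvStepA_eq (st : String) (vs : List String) (d : PySem.Dict String (List String))
    (p : String × List (String × String)) :
    (let animal_status := pvStatusOf st p.2
     if st = "intrinsic_imaging_result" then
       if animal_status = "c1_c2" then pvAppendAt d "c1_c2" p.1
       else if ¬ (animal_status = "unknown" ∨ animal_status = "n/a") then pvAppendAt d "other" p.1
       else d
     else if st = "learner" then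
       if animal_status = "learner" then pvAppendAt d "learner" p.1
       else if ¬ (animal_status = "unknown") then pvAppendAt d "non-learner" p.1
       else d
     else if animal_status ∈ vs then pvAppendAt d animal_status p.1
     else d) =
    (match pvBucket st vs (pvStatusOf st p.2) with
     | some k => pvAppendAt d k p.1
     | none => d) := by
  simp only [pvBucket]
  split_ifs <;> simp_all

theorem pvStepA_none (st : String) (vs : List String) (d : PySem.Dict String (List String))
    (p : String × List (String × String))
    (h : pvBucket st vs (pvStatusOf st p.2) = none) :
    (let animal_status := pvStatusOf st p.2
     if st = "intrinsic_imaging_result" then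
       if animal_status = "c1_c2" then pvAppendAt d "c1_c2" p.1
       else if ¬ (animal_status = "unknown" ∨ animal_status = "n/a") then pvAppendAt d "other" p.1
       else d
     else if st = "learner" then
       if animal_status = "learner" then pvAppendAt d "learner" p.1
       else if ¬ (animal_status = "unknown") then pvAppendAt d "non-learner" p.1
       else d
     else if animal_status ∈ vs then pvAppendAt d animal_status p.1
     else d) = d := by
  rw [pvStepA_eq st vs d p, h]

theorem pvStepA_some (st : String) (vs : List String) (d : PySem.Dict String (List String))
    (p : String × List (String × String)) (k : String)
    (h : pvBucket st vs (pvStatusOf st p.2) = some k) :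
    (let animal_status := pvStatusOf st p.2
     if st = "intrinsic_imaging_result" then
       if animal_status = "c1_c2" then pvAppendAt d "c1_c2" p.1
       else if ¬ (animal_status = "unknown" ∨ animal_status = "n/a") then pvAppendAt d "other" p.1
       else d
     else if st = "learner" then
       if animal_status = "learner" then pvAppendAt d "learner" p.1
       else if ¬ (animal_status = "unknown") then pvAppendAt d "non-learner" p.1
       else d
     else if animal_status ∈ vs then pvAppendAt d animal_status p.1
     else d) = pvAppendAt d k p.1 := by
  rw [pvStepA_eq st vs d p, h]

theorem pvLoopA (st : String) (vs : List String)
    (l : List (String × List (String × String))) :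
    ∀ (d : PySem.Dict String (List String)), d.keys.Nodup →
    (l.foldl (fun d p =>
      let animal_status := pvStatusOf st p.2
      if st = "intrinsic_imaging_result" then
        if animal_status = "c1_c2" then pvAppendAt d "c1_c2" p.1
        else if ¬ (animal_status = "unknown" ∨ animal_status = "n/a") then pvAppendAt d "other" p.1
        else d
      else if st = "learner" then
        if animal_status = "learner" then pvAppendAt d "learner" p.1
        else if ¬ (animal_status = "unknown") then pvAppendAt d "non-learner" p.1
        else d
      else if animal_status ∈ vs then pvAppendAt d animal_status p.1
      else d) d).items =
    d.items.map (fun kv => (kv.1, kv.2 ++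
      (l.filter (fun p => pvBucket st vs (pvStatusOf st p.2) == some kv.1)).map (fun p => p.1))) := by
  induction l with
  | nil => intro d _; simp
  | cons p l ih =>
    intro d hnd
    rw [List.foldl_cons]
    cases hb : pvBucket st vs (pvStatusOf st p.2) with
    | none =>
      rw [pvStepA_none st vs d p hb, ih d hnd]
      apply List.map_congr_left
      intro kv _
      simp [hb]
    | some k =>
      rw [pvStepA_some st vs d p k hb]
      cases hg : d.get? k with
      | none =>
        have ha : pvAppendAt d k p.1 = d := by simp [pvAppendAt, hg]
        rw [ha, ih d hnd]
        apply List.map_congr_left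
        intro kv hkv
        have hk1 : kv.1 ∈ d.keys := PySem.Dict.mem_keys_of_mem_items _ hkv
        have hne : k ≠ kv.1 := by
          intro he; subst he
          rw [PySem.Dict.get?_eq_none_iff_not_mem_keys] at hg
          exact hg hk1
        simp [hb, hne]
      | some v =>
        have ha : pvAppendAt d k p.1 = d.insert k (v ++ [p.1]) := by simp [pvAppendAt, hg]
        have hc : d.contains k := by
          rw [PySem.Dict.contains_eq_isSome_get?, hg]; rfl
        have hnd' : (d.insert k (v ++ [p.1])).keys.Nodup := by
          rw [PySem.Dict.keys_insert_of_contains _ _ hc]; exact hnd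
        rw [ha, ih _ hnd', PySem.Dict.items_insert_of_contains _ _ hc, List.map_map]
        apply List.map_congr_left
        intro kv hkv
        by_cases he : kv.1 = k
        · have : d.get? kv.1 = some kv.2 := PySem.Dict.get?_of_mem_items _ hkv hnd
          rw [he, hg] at this
          have hv : kv.2 = v := by injection this with h; exact h.symm
          simp [Function.comp, he, hv, hb, List.append_assoc]
        · have : (kv.1 == k) = false := by simp [he]
          simp [Function.comp, this, hb, Ne.symm he]
  
theorem pvInitItems (vs : List String) :
    ∀ (d : PySem.Dict String (List String)) (L : List String),
    d.items = L.map (fun k => (k, ([] : List String))) →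
    (vs.foldl (fun d s => d.insert s ([] : List String)) d).items =
      (PySem.Set.update L vs).map (fun k => (k, ([] : List String))) := by
  induction vs with
  | nil => intro d L h; simpa [PySem.Set.update] using h
  | cons s vs ih =>
    intro d L h
    have hkeys : d.keys = L := by
      simp [PySem.Dict.keys, h, List.map_map, Function.comp_def]
    rw [List.foldl_cons, PySem.Set.update_cons]
    by_cases hm : s ∈ L
    · have hc : d.contains s := by
        rw [PySem.Dict.contains_iff_mem_keys, hkeys]; exact hm
      have : (d.insert s ([] : List String)).items = L.map (fun k => (k, ([] : List String))) := by
        rw [PySem.Dict.items_insert_of_contains _ _ hc, h, List.map_map]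
        apply List.map_congr_left
        intro k _
        by_cases he : k = s <;> simp [Function.comp, he]
      rw [ih _ L this, PySem.Set.add_of_mem hm]
    · have hc : d.contains s = false := by
        rw [Bool.eq_false_iff]
        intro hcc
        rw [PySem.Dict.contains_iff_mem_keys, hkeys] at hcc
        exact hm hcc
      have : (d.insert s ([] : List String)).items = (L ++ [s]).map (fun k => (k, ([] : List String))) := by
        rw [PySem.Dict.items_insert_of_not_contains _ _ hc, h]; simp
      rw [ih _ (L ++ [s]) this, PySem.Set.add_of_not_mem hm]

theorem pvLoopB (st : String) (metadata : List (String × List (String × String)))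
    (vs : List String) :
    ∀ (d : PySem.Dict String (List String)) (L : List String),
    d.items = L.map (fun k => (k,
      (metadata.filter (fun p => pvBucketTest st k (pvStatusOf st p.2))).map (fun p => p.1))) →
    (vs.foldl (fun d key =>
        if d.contains key then d
        else d.insert key
          ((metadata.filter (fun p => pvBucketTest st key (pvStatusOf st p.2))).map
            (fun p => p.1))) d).items =
    (PySem.Set.update L vs).map (fun k => (k,
      (metadata.filter (fun p => pvBucketTest st k (pvStatusOf st p.2))).map (fun p => p.1))) := by
  induction vs with
  | nil => intro d L h; simpa [PySem.Set.update] using h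
  | cons key vs ih =>
    intro d L h
    have hkeys : d.keys = L := by
      simp [PySem.Dict.keys, h, List.map_map, Function.comp_def]
    rw [List.foldl_cons, PySem.Set.update_cons]
    by_cases hm : key ∈ L
    · have hc : d.contains key := by
        rw [PySem.Dict.contains_iff_mem_keys, hkeys]; exact hm
      rw [if_pos hc, PySem.Set.add_of_mem hm]
      exact ih d L h
    · have hc : d.contains key = false := by
        rw [Bool.eq_false_iff]
        intro hcc
        rw [PySem.Dict.contains_iff_mem_keys, hkeys] at hcc
        exact hm hcc
      rw [if_neg (by simp [hc]), PySem.Set.add_of_not_mem hm]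
      apply ih
      rw [PySem.Dict.items_insert_of_not_contains _ _ hc, h]; simp

theorem pvBucket_eq_test (st : String) (vs : List String) (k : String) (hk : k ∈ vs) (a : String) :
    (pvBucket st vs a == some k) = pvBucketTest st k a := by
  unfold pvBucket pvBucketTest
  split_ifs <;> (try simp_all) <;> (try (by_cases hak : a = k <;> simp_all)) <;> tauto

theorem pvInitNodup (vs : List String) :
    ((vs.foldl (fun d s => d.insert s ([] : List String)) PySem.Dict.empty).keys).Nodup :=
  PySem.Dict.nodup_keys_foldl_insert vs _ _ PySem.Dict.nodup_keys_empty

-- ===== VERDICT (by name: the statement is the Claim_ definition above) =====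
theorem get_animals_by_status_spec : Claim_equal_get_animals_by_status := by
  intro metadata status_type status_values _ _
  unfold Spec_get_animals_by_status get_animals_by_status get_animals_by_status_alt
  rw [pvLoopA status_type (pvResolveValues metadata status_type status_values) metadata _
        (pvInitNodup _),
      pvInitItems _ PySem.Dict.empty [] rfl,
      pvLoopB status_type metadata _ PySem.Dict.empty [] rfl]
  rw [List.map_map]
  apply List.map_congr_left
  intro k hk
  have hkvs : k ∈ pvResolveValues metadata status_type status_values :=
    (PySem.Set.mem_ofList _ _).mp hk
  simp only [Function.comp]
  congr 1
  simp only [List.nil_append]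
  congr 1
  apply List.filter_congr
  intro p _
  exact pvBucket_eq_test status_type _ k hkvs (pvStatusOf status_type p.2)
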